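-- pv_equiv track=rewrite | github.com/sunghj1118/algorithm | DFS_BFS/4852/4852.py | create_directed_graphs
-- ===== SOURCE A (Python) =====
-- def create_directed_graphs(parties):
--     # Function to create a directed graph for each party
--     graphs = []
--
--     for party in parties:
--         graph = {}
--
--         for giver, receiver in party:
--             if giver not in graph:
--                 graph[giver] = []
--             graph[giver].append(receiver)
--
--             # Ensure all guests are represented in the graph
--             if receiver not in graph:
--                 graph[receiver] = []
--
--         graphs.append(graph)
--
--     return graphs
-- ===== SOURCE B (Python) =====
-- def create_directed_graphs(parties):
--     # Grouping build: compute first-occurrence node order, then a dict comprehension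
--     # that groups each node's receivers by filtering the edge list.
--     graphs = []
--     for party in parties:
--         order = []
--         for giver, receiver in party:
--             if giver not in order:
--                 order.append(giver)
--             if receiver not in order:
--                 order.append(receiver)
--         graphs.append({node: [r for g, r in party if g == node] for node in order})
--     return graphs
-- ===== Notes on version B (the rewrite author's own statement) =====
-- stated objective: alternative
-- what changed: B never mutates a dict incrementally: it first computes the first-occurrence order of all endpoints as a plain list, then builds each graph in one dict comprehension that groups every node's receivers by filtering the whole edge list per node (O(n*m) grouping instead of A's O(m) incremental appends).
import Mathlib
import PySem

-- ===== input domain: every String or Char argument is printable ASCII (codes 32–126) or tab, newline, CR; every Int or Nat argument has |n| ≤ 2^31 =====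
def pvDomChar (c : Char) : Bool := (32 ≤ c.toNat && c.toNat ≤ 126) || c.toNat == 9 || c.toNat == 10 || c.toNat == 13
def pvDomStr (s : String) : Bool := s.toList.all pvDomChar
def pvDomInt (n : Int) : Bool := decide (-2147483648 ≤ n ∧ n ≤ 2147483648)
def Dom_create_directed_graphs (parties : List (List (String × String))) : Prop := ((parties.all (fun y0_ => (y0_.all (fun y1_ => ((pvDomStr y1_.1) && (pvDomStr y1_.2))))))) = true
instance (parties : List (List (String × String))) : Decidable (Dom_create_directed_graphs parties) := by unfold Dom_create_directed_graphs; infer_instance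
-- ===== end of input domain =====

-- B builds each graph by computing the first-occurrence node order as a plain list and then grouping each node's receivers by filtering the edge list, instead of A's incremental dict mutation; same return value proved on all inputs.


-- ===== PORT A =====
-- one interleaved pass per party: ensure giver key, append receiver, ensure receiver key
def cdgStepA (g : PySem.Dict String (List String)) (e : String × String) :
    PySem.Dict String (List String) :=
  let g1 := if g.contains e.1 then g else g.insert e.1 []
  let g2 := g1.modify e.1 [] (fun v => v ++ [e.2])
  if g2.contains e.2 then g2 else g2.insert e.2 []

def create_directed_graphs (parties : List (List (String × String))) :
    List (List (String × List String)) :=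
  parties.map (fun party => (party.foldl cdgStepA PySem.Dict.empty).items)

-- ===== PORT B =====
-- first pass: first-occurrence order of all endpoints, kept as a plain list
def cdgOrd (o : List String) (e : String × String) : List String :=
  let o1 := if e.1 ∈ o then o else o ++ [e.1]
  if e.2 ∈ o1 then o1 else o1 ++ [e.2]

-- dict comprehension over `order` (keys are distinct, so its items are this map);
-- each node's value groups the receivers by filtering the whole edge list
def create_directed_graphs_alt (parties : List (List (String × String))) :
    List (List (String × List String)) :=
  parties.map (fun party =>
    (party.foldl cdgOrd []).map (fun node =>
      (node, (party.filter (fun p => p.1 == node)).map (·.2))))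

-- ===== PRECONDITION & SPEC =====
def Spec_create_directed_graphs (parties : List (List (String × String))) (out : List (List (String × List String))) : Prop := out = create_directed_graphs_alt parties
instance (parties : List (List (String × String))) (out : List (List (String × List String))) : Decidable (Spec_create_directed_graphs parties out) := by unfold Spec_create_directed_graphs; infer_instance

-- ===== CLAIM (what is proved, stated in full; the proofs are below) =====
def Claim_equal_create_directed_graphs : Prop := ∀ (parties : List (List (String × String))), Dom_create_directed_graphs parties → Spec_create_directed_graphs parties (create_directed_graphs parties)

-- ===== LEMMAS AND PROOFS =====

-- modify at a contained key leaves the key list unchanged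
theorem keys_modify_of_contains (g : PySem.Dict String (List String)) (k : String)
    (d0 : List String) (f : List String → List String) (h : g.contains k = true) :
    (g.modify k d0 f).keys = g.keys := by
  rw [PySem.Dict.keys_modify, PySem.Dict.keys_insert_of_contains _ _ h]

theorem contains_modify_of_contains (g : PySem.Dict String (List String)) (k k' : String)
    (d0 : List String) (f : List String → List String) (h : g.contains k = true) :
    (g.modify k d0 f).contains k' = g.contains k' := by
  rw [PySem.Dict.contains_modify]
  by_cases hk : k' = k
  · simp [hk, h]
  · simp [hk]

-- A's interleaved step acts on the key list exactly as B's order step acts on the order list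
theorem keys_stepA (g : PySem.Dict String (List String)) (e : String × String) :
    (cdgStepA g e).keys = cdgOrd g.keys e := by
  unfold cdgStepA cdgOrd
  have hc1 : g.contains e.1 = decide (e.1 ∈ g.keys) := PySem.Dict.contains_eq_decide_mem_keys g e.1
  by_cases h1 : e.1 ∈ g.keys
  · have hg1 : g.contains e.1 = true := by rw [hc1]; simp [h1]
    have hk : (g.modify e.1 [] (fun v => v ++ [e.2])).keys = g.keys :=
      keys_modify_of_contains g e.1 [] _ hg1
    have hc2 : (g.modify e.1 [] (fun v => v ++ [e.2])).contains e.2 = decide (e.2 ∈ g.keys) := by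
      rw [PySem.Dict.contains_eq_decide_mem_keys, hk]
    simp only [hg1, if_true, h1]
    by_cases h2 : e.2 ∈ g.keys
    · simp [hc2, h2, hk]
    · have : (g.modify e.1 [] (fun v => v ++ [e.2])).contains e.2 = false := by
        rw [hc2]; simp [h2]
      simp only [this, Bool.false_eq_true, if_false, h2]
      rw [PySem.Dict.keys_insert_of_not_contains _ _ this, hk]
  · have hg1 : g.contains e.1 = false := by rw [hc1]; simp [h1]
    have hins : (g.insert e.1 []).keys = g.keys ++ [e.1] :=
      PySem.Dict.keys_insert_of_not_contains _ _ hg1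
    have hg1' : (g.insert e.1 []).contains e.1 = true := by
      simp [PySem.Dict.contains_insert_self]
    have hk : ((g.insert e.1 []).modify e.1 [] (fun v => v ++ [e.2])).keys
        = g.keys ++ [e.1] := by
      rw [keys_modify_of_contains _ e.1 [] _ hg1', hins]
    have hc2 : ((g.insert e.1 []).modify e.1 [] (fun v => v ++ [e.2])).contains e.2
        = decide (e.2 ∈ g.keys ++ [e.1]) := by
      rw [PySem.Dict.contains_eq_decide_mem_keys, hk]
    simp only [hg1, Bool.false_eq_true, if_false, h1, if_false]
    by_cases h2 : e.2 ∈ g.keys ++ [e.1]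
    · simp [hc2, h2, hk]
    · have hf : ((g.insert e.1 []).modify e.1 [] (fun v => v ++ [e.2])).contains e.2 = false := by
        rw [hc2]; simp only [decide_eq_false_iff_not]; exact h2
      simp only [hf, Bool.false_eq_true, if_false, h2]
      rw [PySem.Dict.keys_insert_of_not_contains _ _ hf, hk]

theorem keys_foldlA (l : List (String × String)) (g : PySem.Dict String (List String)) :
    (l.foldl cdgStepA g).keys = l.foldl cdgOrd g.keys := by
  induction l generalizing g with
  | nil => rfl
  | cons e rest ih => rw [List.foldl_cons, List.foldl_cons, ih, keys_stepA]

-- the order list stays duplicate-free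
theorem nodup_ord (o : List String) (e : String × String) (h : o.Nodup) : (cdgOrd o e).Nodup := by
  unfold cdgOrd
  by_cases h1 : e.1 ∈ o
  · simp only [h1, if_true]
    by_cases h2 : e.2 ∈ o
    · simp [h2, h]
    · simp only [h2, if_false, List.nodup_append]
      aesop
  · simp only [h1, if_false]
    by_cases h2 : e.2 ∈ o ++ [e.1]
    · simp only [h2, if_true, List.nodup_append]
      aesop
    · simp only [h2, if_false, List.nodup_append]
      simp only [List.mem_append, List.mem_singleton, not_or] at h2
      aesop

theorem nodup_foldlOrd (l : List (String × String)) (o : List String) (h : o.Nodup) :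
    (l.foldl cdgOrd o).Nodup := by
  induction l generalizing o with
  | nil => exact h
  | cons e rest ih => exact ih _ (nodup_ord o e h)

-- getD characterisation of A's step and fold
theorem stepA_getD (g : PySem.Dict String (List String)) (e : String × String) (c : String) :
    (cdgStepA g e).getD c [] = g.getD c [] ++ (if e.1 = c then [e.2] else []) := by
  unfold cdgStepA
  have key : ∀ (g1 : PySem.Dict String (List String)), g1.contains e.1 = true →
      g1.getD c [] = g.getD c [] →
      (if (g1.modify e.1 [] (fun v => v ++ [e.2])).contains e.2 = true
        then g1.modify e.1 [] (fun v => v ++ [e.2])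
        else (g1.modify e.1 [] (fun v => v ++ [e.2])).insert e.2 []).getD c []
      = g.getD c [] ++ (if e.1 = c then [e.2] else []) := by
    intro g1 hc hg
    have hm : (g1.modify e.1 [] (fun v => v ++ [e.2])).getD c []
        = g1.getD c [] ++ (if e.1 = c then [e.2] else []) := by
      rw [PySem.Dict.getD_modify]
      by_cases hce : c = e.1
      · simp [hce]
      · simp [hce, Ne.symm hce]
    by_cases h2 : (g1.modify e.1 [] (fun v => v ++ [e.2])).contains e.2 = true
    · simp only [h2, if_true]; rw [hm, hg]
    · simp only [eq_false_of_ne_true h2, Bool.false_eq_true, if_false]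
      rw [PySem.Dict.getD_insert]
      by_cases hc2 : c = e.2
      · -- the receiver key was absent after the modify, so its getD was [] anyway
        have hcontc := contains_modify_of_contains g1 e.1 e.2 [] (fun v => v ++ [e.2]) hc
        have hgc : g1.contains e.2 = false := by
          rw [← hcontc]; exact eq_false_of_ne_true h2
        have h1c : e.2 ≠ e.1 := by
          intro hh; rw [hh] at hgc; rw [hgc] at hc; exact Bool.false_ne_true hc
        have hnil : g1.getD e.2 [] = [] := PySem.Dict.getD_of_not_contains _ _ hgc
        have he1c : ¬ e.1 = e.2 := fun hh => h1c hh.symm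
        rw [if_pos hc2, ← hg, hc2, hnil, if_neg he1c]
        simp
      · simp only [hc2, if_false]; rw [hm, hg]
  by_cases h1 : g.contains e.1 = true
  · simp only [h1, if_true]
    exact key g h1 rfl
  · simp only [eq_false_of_ne_true h1, Bool.false_eq_true, if_false]
    refine (key (g.insert e.1 []) (by simp [PySem.Dict.contains_insert_self]) ?_)
    rw [PySem.Dict.getD_insert]
    by_cases hc : c = e.1
    · rw [if_pos hc, hc, PySem.Dict.getD_of_not_contains _ _ (eq_false_of_ne_true h1)]
    · rw [if_neg hc]

theorem foldlA_getD (l : List (String × String)) (g : PySem.Dict String (List String)) (c : String) :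
    (l.foldl cdgStepA g).getD c [] = g.getD c [] ++ ((l.filter (fun p => p.1 == c)).map (·.2)) := by
  induction l generalizing g with
  | nil => simp
  | cons e rest ih =>
      simp only [List.foldl_cons, ih, stepA_getD, List.filter_cons]
      by_cases h : e.1 = c <;> simp [h, List.append_assoc]

-- ===== VERDICT (by name: the statement is the Claim_ definition above) =====
theorem create_directed_graphs_spec : Claim_equal_create_directed_graphs := by
  intro parties _
  unfold Spec_create_directed_graphs create_directed_graphs create_directed_graphs_alt
  refine List.map_congr_left (fun party _ => ?_)
  have hkeys : (party.foldl cdgStepA PySem.Dict.empty).keys = party.foldl cdgOrd [] := by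
    rw [keys_foldlA, PySem.Dict.keys_empty]
  have hn : (party.foldl cdgStepA PySem.Dict.empty).keys.Nodup := by
    rw [hkeys]; exact nodup_foldlOrd party [] List.nodup_nil
  rw [PySem.Dict.items_eq_map_keys _ hn ([] : List String), hkeys]
  refine List.map_congr_left (fun k _ => ?_)
  rw [foldlA_getD, PySem.Dict.getD_empty]
  simp
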